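-- pv_equiv track=rewrite | github.com/JD-Canada/pyFVM | pyFVM/src/mesh/cfdInvertConnectivity.py | cfdInvertConnectivity
-- ===== SOURCE A (Python) =====
-- def cfdInvertConnectivity(theConnectivityArray):
--
--
--     theInvertedSize=0
--
--     for i in range(len(theConnectivityArray)):
--         for j in range(len(theConnectivityArray[i])):
--
--             theInvertedSize=max(theInvertedSize, int(theConnectivityArray[i][j]))
--
--     theInvertedConnectivityArray = [[] for i in range(theInvertedSize+1)]
--
--     for i in range(len(theConnectivityArray)):
--         for j in range(len(theConnectivityArray[i])):
--             theInvertedConnectivityArray[int(theConnectivityArray[i][j])].append(i)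
--
--     return theInvertedConnectivityArray
-- ===== SOURCE B (Python) =====
-- def cfdInvertConnectivity(theConnectivityArray):
--     buckets = {}
--     maxIndex = 0
--     for i, row in enumerate(theConnectivityArray):
--         for value in row:
--             k = int(value)
--             buckets.setdefault(k, []).append(i)
--             if k > maxIndex:
--                 maxIndex = k
--     return [buckets.get(k, []) for k in range(maxIndex + 1)]
-- ===== Notes on version B (the rewrite author's own statement) =====
-- stated objective: idiomatic
-- what changed: A's dedicated max-finding nested pass is fused away: B makes one accumulation pass building a dict of buckets while tracking the running maximum, then materialises the result with a flat comprehension over range(max+1).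
-- outside the precondition, e.g. on cfdInvertConnectivity([[-1]]): A returns [[0]], B returns [[]]; on cfdInvertConnectivity([[0], [-2]]): A raises IndexError, B returns [[0]]
import Mathlib
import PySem

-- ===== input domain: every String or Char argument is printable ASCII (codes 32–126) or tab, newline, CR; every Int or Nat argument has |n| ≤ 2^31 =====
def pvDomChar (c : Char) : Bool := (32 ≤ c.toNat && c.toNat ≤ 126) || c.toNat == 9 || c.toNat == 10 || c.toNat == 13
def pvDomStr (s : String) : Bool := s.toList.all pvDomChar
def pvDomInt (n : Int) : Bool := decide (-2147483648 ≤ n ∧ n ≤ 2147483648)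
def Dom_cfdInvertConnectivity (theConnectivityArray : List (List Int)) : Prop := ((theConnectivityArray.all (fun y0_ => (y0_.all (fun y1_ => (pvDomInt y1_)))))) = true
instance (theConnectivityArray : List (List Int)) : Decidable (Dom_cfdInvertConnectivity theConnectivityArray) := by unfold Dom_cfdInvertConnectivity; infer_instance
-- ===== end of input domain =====

-- B fuses A's separate max-finding pass into the single bucket-accumulation pass (dict keyed by
-- value) and materialises the result with a flat pass over range(max+1); one data pass instead of two.

-- ===== PORT A =====
-- `theInvertedConnectivityArray[v].append(i)` with Python's negative-index wrap;
-- out-of-range (IndexError in Python) returns the array unchanged — unreachable under Pre_.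
def pvAppendAt (arr : List (List Int)) (v : Int) (i : Int) : List (List Int) :=
  let idx := if v < 0 then v + arr.length else v
  if 0 ≤ idx ∧ idx < arr.length then
    arr.set idx.toNat (arr.getD idx.toNat [] ++ [i])
  else arr

def cfdInvertConnectivity (theConnectivityArray : List (List Int)) : List (List Int) :=
  let theInvertedSize :=
    theConnectivityArray.foldl (fun m row => row.foldl (fun m v => max m v) m) 0
  let init := List.replicate (theInvertedSize + 1).toNat ([] : List Int)
  (PySem.List.enumerate theConnectivityArray 0).foldl
    (fun arr p => p.2.foldl (fun arr v => pvAppendAt arr v p.1) arr) init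

-- ===== PORT B =====
def cfdInvertConnectivity_alt (theConnectivityArray : List (List Int)) : List (List Int) :=
  let st :=
    (PySem.List.enumerate theConnectivityArray 0).foldl
      (fun (st : PySem.Dict Int (List Int) × Int) p =>
        p.2.foldl
          (fun st v => (st.1.insert v (st.1.getD v [] ++ [p.1]),
                        if v > st.2 then v else st.2)) st)
      (PySem.Dict.empty, 0)
  (PySem.List.pyRange 0 (st.2 + 1) 1).map (fun k => st.1.getD k [])

-- ===== PRECONDITION & SPEC =====
-- Pre_ excludes arrays containing a negative entry: on such inputs A either raises IndexError
-- (entry < -(max+1)) or silently wraps the negative index onto the end of the freshly built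
-- array, an artefact of Python list indexing that no caller of a connectivity inverter relies on.
def Pre_cfdInvertConnectivity (theConnectivityArray : List (List Int)) : Prop :=
  ∀ row ∈ theConnectivityArray, ∀ v ∈ row, 0 ≤ v
instance (theConnectivityArray : List (List Int)) : Decidable (Pre_cfdInvertConnectivity theConnectivityArray) := by unfold Pre_cfdInvertConnectivity; infer_instance

def pvWitness_cfdInvertConnectivity : List (List Int) := [[0, 2], [2, 0], []]

def Spec_cfdInvertConnectivity (theConnectivityArray : List (List Int)) (out : List (List Int)) : Prop := out = cfdInvertConnectivity_alt theConnectivityArray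
instance (theConnectivityArray : List (List Int)) (out : List (List Int)) : Decidable (Spec_cfdInvertConnectivity theConnectivityArray out) := by unfold Spec_cfdInvertConnectivity; infer_instance

-- ===== CLAIM (what is proved, stated in full; the proofs are below) =====
def Claim_equal_cfdInvertConnectivity : Prop := ∀ (theConnectivityArray : List (List Int)), Dom_cfdInvertConnectivity theConnectivityArray → Pre_cfdInvertConnectivity theConnectivityArray → Spec_cfdInvertConnectivity theConnectivityArray (cfdInvertConnectivity theConnectivityArray)

-- ===== LEMMAS AND PROOFS =====

-- the stream of (row index, entry) pairs both nested loops traverse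
def pvPairs (theConnectivityArray : List (List Int)) : List (Int × Int) :=
  (PySem.List.enumerate theConnectivityArray 0).flatMap
    (fun p => p.2.map (fun v => (p.1, v)))

-- a nested foldl is the foldl over the flattened pair stream
theorem pv_foldl_flat {σ : Type} (l : List (Int × List Int)) (g : σ → Int × Int → σ) (init : σ) :
    l.foldl (fun s p => p.2.foldl (fun s v => g s (p.1, v)) s) init
      = (l.flatMap (fun p => p.2.map (fun v => (p.1, v)))).foldl g init := by
  induction l generalizing init with
  | nil => rfl
  | cons hd tl ih =>
      simp only [List.flatMap_cons, List.foldl_cons, List.foldl_append, ih, List.foldl_map]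

-- a fold with a product state whose components do not interact splits
theorem pv_foldl_prod {α β γ : Type} (l : List γ) (f : α → γ → α) (g : β → γ → β)
    (a : α) (b : β) :
    l.foldl (fun (s : α × β) x => (f s.1 x, g s.2 x)) (a, b) = (l.foldl f a, l.foldl g b) := by
  induction l generalizing a b with
  | nil => rfl
  | cons hd tl ih => simp [List.foldl_cons, ih]

theorem pv_max_eq (m v : Int) : (if v > m then v else m) = max m v := by
  rw [max_def]; split_ifs <;> omega

-- a fold over enumerate that ignores the index is a fold over the list
theorem pv_fold_enum_snd {sigma : Type} (l : List (List Int)) (g : sigma → List Int → sigma)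
    (s : Int) (init : sigma) :
    (PySem.List.enumerate l s).foldl (fun acc p => g acc p.2) init = l.foldl g init := by
  induction l generalizing s init with
  | nil => rfl
  | cons hd tl ih =>
      simp only [PySem.List.enumerate_cons, List.foldl_cons, ih]

-- the running maximum bounds every element of the stream, and the initial value
theorem pv_le_foldl_max (l : List Int) (m : Int) : m ≤ l.foldl max m := by
  induction l generalizing m with
  | nil => simp
  | cons hd tl ih => exact le_trans (le_max_left m hd) (ih _)

theorem pv_mem_le_foldl_max (l : List Int) (m v : Int) (hv : v ∈ l) : v ≤ l.foldl max m := by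
  induction l generalizing m with
  | nil => simp at hv
  | cons hd tl ih =>
      rcases List.mem_cons.mp hv with rfl | h
      · exact le_trans (le_max_right m v) (pv_le_foldl_max _ _)
      · exact ih _ h

-- core invariant: folding the pair stream keeps the array and the dict in pointwise agreement
theorem pv_invariant (ps : List (Int × Int)) (N : Nat)
    (arr : List (List Int)) (d : PySem.Dict Int (List Int))
    (hlen : arr.length = N)
    (hv : ∀ p ∈ ps, 0 ≤ p.2 ∧ p.2 < (N : Int))
    (hag : ∀ k : Int, 0 ≤ k → k < (N : Int) → arr.getD k.toNat [] = d.getD k []) :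
    (ps.foldl (fun arr q => pvAppendAt arr q.2 q.1) arr).length = N ∧
    (∀ k : Int, 0 ≤ k → k < (N : Int) →
      (ps.foldl (fun arr q => pvAppendAt arr q.2 q.1) arr).getD k.toNat []
        = (ps.foldl (fun d q => d.insert q.2 (d.getD q.2 [] ++ [q.1])) d).getD k []) := by
  induction ps generalizing arr d with
  | nil => exact ⟨hlen, hag⟩
  | cons q ps ih =>
      obtain ⟨hq0, hqN⟩ := hv q (List.mem_cons_self ..)
      have hidx : ¬ q.2 < 0 := by omega
      have hqlt : q.2.toNat < arr.length := by rw [hlen]; omega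
      have harr' : pvAppendAt arr q.2 q.1
          = arr.set q.2.toNat (arr.getD q.2.toNat [] ++ [q.1]) := by
        simp only [pvAppendAt]
        rw [if_neg hidx, if_pos ⟨hq0, by rw [hlen]; exact hqN⟩]
      simp only [List.foldl_cons]
      apply ih
      · rw [harr']; simp [hlen]
      · exact fun p hp => hv p (List.mem_cons_of_mem _ hp)
      · intro k hk0 hkN
        rw [harr', PySem.Dict.getD_insert]
        by_cases hkq : k = q.2
        · rw [if_pos hkq, hkq]
          rw [List.getD_eq_getElem _ _ (by simpa using hqlt)]
          rw [List.getElem_set_self (by simpa using hqlt)]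
          rw [hag q.2 hq0 hqN]
        · rw [if_neg hkq, ← hag k hk0 hkN]
          have hne : q.2.toNat ≠ k.toNat := by omega
          rcases lt_or_ge k.toNat arr.length with hlt | hge
          · rw [List.getD_eq_getElem _ _ (by simpa using hlt),
                List.getD_eq_getElem _ _ hlt, List.getElem_set_ne hne]
          · rw [List.getD_eq_default _ _ (by simpa using hge), List.getD_eq_default _ _ hge]

-- ===== VERDICT (by name: the statement is the Claim_ definition above) =====
theorem cfdInvertConnectivity_spec : Claim_equal_cfdInvertConnectivity := by
  intro ca _ hpre
  simp only [Spec_cfdInvertConnectivity, cfdInvertConnectivity, cfdInvertConnectivity_alt]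
  set ps := pvPairs ca with hps
  -- every entry of the stream is an entry of some row of ca
  have hmem : ∀ p ∈ ps, 0 ≤ p.2 := by
    intro p hp
    simp only [hps, pvPairs, List.mem_flatMap] at hp
    obtain ⟨q, hq, hv⟩ := hp
    obtain ⟨v, hv', rfl⟩ := List.mem_map.mp hv
    simp only [PySem.List.mem_enumerate_iff] at hq
    obtain ⟨k, hk, rfl⟩ := hq
    exact hpre _ (List.getElem_mem hk) _ hv'
  -- rewrite A's max pass as a fold over ps
  have hmaxA :
      ca.foldl (fun m row => row.foldl (fun m v => max m v) m) 0
        = ps.foldl (fun m q => max m q.2) 0 := by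
    rw [hps, pvPairs, ← pv_foldl_flat (g := fun m q => max m q.2)]
    exact (pv_fold_enum_snd ca (fun m row => row.foldl (fun m v => max m v) m) 0 0).symm
  set M := ps.foldl (fun m q => max m q.2) 0 with hM
  have hMfold : M = (ps.map (·.2)).foldl max 0 := by rw [hM, List.foldl_map]
  have hM0 : 0 ≤ M := hMfold ▸ pv_le_foldl_max _ _
  -- rewrite both nested loops as folds over ps
  rw [pv_foldl_flat (g := fun arr q => pvAppendAt arr q.2 q.1), ← pvPairs, ← hps, hmaxA]
  rw [pv_foldl_flat
        (g := fun (st : PySem.Dict Int (List Int) × Int) q =>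
          (st.1.insert q.2 (st.1.getD q.2 [] ++ [q.1]), if q.2 > st.2 then q.2 else st.2)),
      ← pvPairs, ← hps]
  have hsplit :
      ps.foldl (fun (st : PySem.Dict Int (List Int) × Int) q =>
          (st.1.insert q.2 (st.1.getD q.2 [] ++ [q.1]), if q.2 > st.2 then q.2 else st.2))
        (PySem.Dict.empty, 0)
      = (ps.foldl (fun d (q : Int × Int) => d.insert q.2 (d.getD q.2 [] ++ [q.1])) PySem.Dict.empty,
         ps.foldl (fun m (q : Int × Int) => if q.2 > m then q.2 else m) 0) :=
    pv_foldl_prod ps (fun d q => d.insert q.2 (d.getD q.2 [] ++ [q.1]))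
      (fun m q => if q.2 > m then q.2 else m) PySem.Dict.empty 0
  simp only [hsplit]
  have hmx : ps.foldl (fun m (q : Int × Int) => if q.2 > m then q.2 else m) 0 = M := by
    rw [hM]; congr 1; funext m q; exact pv_max_eq m q.2
  rw [hmx]
  -- bounds for stream entries
  have hvbound : ∀ p ∈ ps, 0 ≤ p.2 ∧ p.2 < (((M + 1).toNat : Nat) : Int) := by
    intro p hp
    have h0 : 0 ≤ p.2 := hmem p hp
    have h1 : p.2 ≤ M := by
      rw [hMfold]
      exact pv_mem_le_foldl_max _ _ _ (List.mem_map_of_mem hp)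
    exact ⟨h0, by omega⟩
  -- apply the invariant from the initial states
  obtain ⟨hlen, hag⟩ := pv_invariant ps (M + 1).toNat
      (List.replicate (M + 1).toNat ([] : List Int)) PySem.Dict.empty
      (by simp)
      hvbound
      (by intro k hk0 hkN
          rw [PySem.Dict.getD_empty, List.getD_eq_getElem _ _ (by simp only [List.length_replicate]; omega)]
          simp)
  -- compare the final array with the final dict, index by index
  apply List.ext_getElem
  · rw [hlen, List.length_map, PySem.List.length_pyRange_one]
    omega
  · intro j hj1 hj2
    have hjN : j < (M + 1).toNat := by rwa [hlen] at hj1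
    have hgr : (PySem.List.pyRange 0 (M + 1) 1)[j]'(by
        rw [PySem.List.length_pyRange_one]; omega) = (j : Int) := by
      rw [PySem.List.getElem_pyRange_one]; omega
    rw [List.getElem_map, hgr]
    have hj := hag (j : Int) (by positivity) (by exact_mod_cast hjN)
    rw [Int.toNat_natCast] at hj
    rw [← hj, List.getD_eq_getElem _ _ (by rwa [hlen])]
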